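-- pv_equiv track=rewrite | github.com/pypi-data/pypi-mirror-362 | packages/zip2zip/zip2zip-0.1.2-py3-none-any.whl/zip2zip/utils.py | str_of_list_to_list
-- ===== SOURCE A (Python) =====
-- def str_of_list_to_list(s: str) -> list[str]:
--     s = s.strip("[]")
--     result = []
--     current = ""
--     in_quotes = False
--
--     for char in s:
--         if char == "'" or char == '"':
--             in_quotes = not in_quotes
--         elif char == "," and not in_quotes:
--             if current.strip():
--                 item = current.strip().strip("'\"")
--                 result.append(item)
--             current = ""
--         else:
--             current += char
--
--     if current.strip():
--         item = current.strip().strip("'\"")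
--         result.append(item)
--
--     return result
-- ===== SOURCE B (Python) =====
-- def str_of_list_to_list(s: str) -> list[str]:
--     parts = s.strip("[]").split(",")
--     result = []
--     buf = None
--     for part in parts:
--         buf = part if buf is None else buf + "," + part
--         if (buf.count("'") + buf.count('"')) % 2 == 0:
--             item = buf.replace("'", "").replace('"', "").strip()
--             if item:
--                 result.append(item)
--             buf = None
--     if buf is not None:
--         item = buf.replace("'", "").replace('"', "").strip()
--         if item:
--             result.append(item)
--     return result
-- ===== Notes on version B (the rewrite author's own statement) =====
-- stated objective: faster
-- what changed: B replaces A's char-by-char in_quotes state machine by splitting on commas first and then merging consecutive parts back together while the merged buffer holds an odd number of quote characters, emitting a field (quotes removed via replace, stripped, non-empty) each time the quote count is even.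
import Mathlib
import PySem

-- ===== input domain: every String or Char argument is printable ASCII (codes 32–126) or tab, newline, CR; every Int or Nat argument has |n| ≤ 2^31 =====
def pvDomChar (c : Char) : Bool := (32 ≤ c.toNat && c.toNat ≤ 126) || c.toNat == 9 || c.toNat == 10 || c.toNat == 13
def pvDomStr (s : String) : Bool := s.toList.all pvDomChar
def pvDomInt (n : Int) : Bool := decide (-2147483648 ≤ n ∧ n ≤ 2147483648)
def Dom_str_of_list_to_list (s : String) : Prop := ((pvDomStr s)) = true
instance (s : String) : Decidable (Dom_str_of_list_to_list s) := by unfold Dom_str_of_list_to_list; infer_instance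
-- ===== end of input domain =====

-- B replaces A's char-by-char in_quotes state machine by split-on-comma then merge-parts-by-quote-parity (objective: faster — a timing run measured B faster on the generated inputs; same return value proved for all strings).

-- ===== PORT A =====
-- loop body of A: quote chars toggle in_quotes, a comma outside quotes flushes current, else append
def pvStepA (st : List String × List Char × Bool) (c : Char) : List String × List Char × Bool :=
  if c = '\'' ∨ c = '"' then (st.1, st.2.1, !st.2.2)
  else if c = ',' ∧ st.2.2 = false then
    (if PySem.Chars.strip st.2.1 ≠ [] then
        st.1 ++ [String.ofList (PySem.Chars.stripChars (PySem.Chars.strip st.2.1) ['\'', '"'])]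
      else st.1, [], false)
  else (st.1, st.2.1 ++ [c], st.2.2)

def str_of_list_to_list (s : String) : List String :=
  let t := PySem.Chars.stripChars s.toList ['[', ']']
  let st := t.foldl pvStepA ([], [], false)
  if PySem.Chars.strip st.2.1 ≠ [] then
    st.1 ++ [String.ofList (PySem.Chars.stripChars (PySem.Chars.strip st.2.1) ['\'', '"'])]
  else st.1

-- ===== PORT B =====
-- B's emit: remove the quote characters, strip, append if non-empty
def pvEmitB (res : List String) (b : List Char) : List String :=
  let item := PySem.Chars.strip (PySem.Chars.replace (PySem.Chars.replace b ['\''] []) ['"'] [])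
  if item ≠ [] then res ++ [String.ofList item] else res

-- loop body of B: open buffer re-joins with ',', close and emit when the quote count is even
def pvStepB (st : List String × Option (List Char)) (part : List Char) : List String × Option (List Char) :=
  let nb := match st.2 with | none => part | some b => b ++ ',' :: part
  if (PySem.Chars.count nb ['\''] + PySem.Chars.count nb ['"']) % 2 = 0 then
    (pvEmitB st.1 nb, none)
  else (st.1, some nb)

def str_of_list_to_list_alt (s : String) : List String :=
  let parts := PySem.Chars.splitOn (PySem.Chars.stripChars s.toList ['[', ']']) [',']
  let st := parts.foldl pvStepB ([], none)
  match st.2 with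
  | none => st.1
  | some b => pvEmitB st.1 b

-- ===== PRECONDITION & SPEC =====
def Spec_str_of_list_to_list (s : String) (out : List String) : Prop := out = str_of_list_to_list_alt s
instance (s : String) (out : List String) : Decidable (Spec_str_of_list_to_list s out) := by unfold Spec_str_of_list_to_list; infer_instance

-- ===== CLAIM (what is proved, stated in full; the proofs are below) =====
def Claim_equal_str_of_list_to_list : Prop := ∀ (s : String), Dom_str_of_list_to_list s → Spec_str_of_list_to_list s (str_of_list_to_list s)

-- ===== LEMMAS AND PROOFS =====

-- quote characters removed / counted
def pvRemQ (l : List Char) : List Char := l.filter (fun c => !(c == '\'' || c == '"'))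
def pvCntQ (l : List Char) : Nat := l.count '\'' + l.count '"'

-- A's flush, factored out
def pvEmitA (res : List String) (cur : List Char) : List String :=
  if PySem.Chars.strip cur ≠ [] then
    res ++ [String.ofList (PySem.Chars.stripChars (PySem.Chars.strip cur) ['\'', '"'])]
  else res

def pvFinishA (st : List String × List Char × Bool) : List String := pvEmitA st.1 st.2.1

def pvFinishB (st : List String × Option (List Char)) : List String :=
  match st.2 with
  | none => st.1
  | some b => pvEmitB st.1 b

-- structural split on a single character (proved equal to PySem.Chars.splitOn · [q])
def pvSplitCh (q : Char) : List Char → List (List Char)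
  | [] => [[]]
  | c :: t =>
    if c = q then [] :: pvSplitCh q t
    else match pvSplitCh q t with
         | [] => [[c]]
         | p :: ps => (c :: p) :: ps

def pvMapHead (f : List Char → List Char) : List (List Char) → List (List Char)
  | [] => []
  | p :: ps => f p :: ps

-- the separators put back for all parts after the first
def pvTailJoin (q : Char) : List (List Char) → List Char
  | [] => []
  | p :: ps => q :: (p ++ pvTailJoin q ps)

-- the simulation invariant between A's state and B's state at a part boundary
def pvInv (stA : List String × List Char × Bool) (stB : List String × Option (List Char)) : Prop :=
  (∀ c ∈ stA.2.1, ¬(c = '\'' ∨ c = '"')) ∧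
  match stB.2 with
  | none => stA.2.2 = false ∧ stB.1 = pvEmitA stA.1 stA.2.1
  | some b => stA.2.2 = true ∧ stA.2.1 = pvRemQ b ∧ pvCntQ b % 2 = 1 ∧ stB.1 = stA.1

theorem pvCountGo (q : Char) : ∀ (l : List Char) (fuel acc : Nat), l.length ≤ fuel →
    PySem.Chars.count.go [q] fuel l acc = acc + l.count q := by
  intro l
  induction l with
  | nil => intro fuel acc h; cases fuel <;> simp [PySem.Chars.count.go]
  | cons c t ih =>
    intro fuel acc h
    cases fuel with
    | zero => simp at h
    | succ f =>
      simp only [PySem.Chars.count.go, List.isPrefixOf, Bool.and_true]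
      by_cases hq : q = c
      · subst hq
        simp only [BEq.rfl, if_true, List.length_cons, List.length_nil, Nat.zero_add,
          List.drop_succ_cons, List.drop_zero]
        rw [ih f (acc+1) (by simpa using h)]
        simp []; omega
      · rw [if_neg (by simp [hq])]
        rw [ih f acc (by simpa using h)]
        simp [List.count_cons]
        intro h'; exact absurd h'.symm hq

theorem pvCount_single (l : List Char) (q : Char) : PySem.Chars.count l [q] = l.count q := by
  simp [PySem.Chars.count, pvCountGo q l l.length 0 (le_refl _)]

theorem pvReplaceGo (q : Char) : ∀ (l : List Char) (fuel : Nat) (acc : List Char), l.length ≤ fuel →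
    PySem.Chars.replace.go [q] [] fuel l acc = acc.reverse ++ l.filter (fun c => !(c == q)) := by
  intro l
  induction l with
  | nil => intro fuel acc h; cases fuel <;> simp [PySem.Chars.replace.go]
  | cons c t ih =>
    intro fuel acc h
    cases fuel with
    | zero => simp at h
    | succ f =>
      simp only [PySem.Chars.replace.go, List.isPrefixOf, Bool.and_true]
      by_cases hq : q = c
      · subst hq
        simp only [BEq.rfl, if_true, List.length_cons, List.length_nil, Nat.zero_add,
          List.drop_succ_cons, List.drop_zero, List.reverse_nil, List.nil_append]
        rw [ih f acc (by simpa using h)]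
        simp []
      · rw [if_neg (by simp [hq])]
        rw [ih f (c :: acc) (by simpa using h)]
        simp [Ne.symm hq]

theorem pvReplace_single (l : List Char) (q : Char) :
    PySem.Chars.replace l [q] [] = l.filter (fun c => !(c == q)) := by
  simp [PySem.Chars.replace, pvReplaceGo q l l.length [] (le_refl _)]

theorem pvRemQ_eq (b : List Char) :
    PySem.Chars.replace (PySem.Chars.replace b ['\''] []) ['"'] [] = pvRemQ b := by
  simp only [pvReplace_single, pvRemQ, List.filter_filter]
  apply List.filter_congr
  intro c _
  cases hc1 : c == '\'' <;> cases hc2 : c == '"' <;> simp_all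

theorem pvSplitCh_ne_nil (q : Char) (l : List Char) : pvSplitCh q l ≠ [] := by
  cases l with
  | nil => simp [pvSplitCh]
  | cons c t =>
    simp only [pvSplitCh]
    split
    · simp
    · split <;> simp

theorem pvSplitGo (q : Char) : ∀ (l : List Char) (fuel : Nat) (cur : List Char) (acc : List (List Char)),
    l.length ≤ fuel →
    PySem.Chars.splitOn.go [q] fuel l cur acc
      = acc.reverse ++ pvMapHead (cur.reverse ++ ·) (pvSplitCh q l) := by
  intro l
  induction l with
  | nil => intro fuel cur acc h; cases fuel <;> simp [PySem.Chars.splitOn.go, pvSplitCh, pvMapHead]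
  | cons c t ih =>
    intro fuel cur acc h
    cases fuel with
    | zero => simp at h
    | succ f =>
      simp only [PySem.Chars.splitOn.go, List.isPrefixOf, Bool.and_true]
      by_cases hq : q = c
      · subst hq
        simp only [BEq.rfl, if_true, List.length_cons, List.length_nil, Nat.zero_add,
          List.drop_succ_cons, List.drop_zero]
        rw [ih f [] (cur.reverse :: acc) (by simpa using h)]
        obtain ⟨p, ps, hps⟩ : ∃ p ps, pvSplitCh q t = p :: ps := by
          cases hsp : pvSplitCh q t with
          | nil => exact absurd hsp (pvSplitCh_ne_nil q t)
          | cons p ps => exact ⟨p, ps, rfl⟩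
        simp [pvSplitCh, hps, pvMapHead]
      · rw [if_neg (by simp [hq])]
        rw [ih f (c :: cur) acc (by simpa using h)]
        obtain ⟨p, ps, hps⟩ : ∃ p ps, pvSplitCh q t = p :: ps := by
          cases hsp : pvSplitCh q t with
          | nil => exact absurd hsp (pvSplitCh_ne_nil q t)
          | cons p ps => exact ⟨p, ps, rfl⟩
        simp [pvSplitCh, hps, pvMapHead, Ne.symm hq]

theorem pvSplitOn_single (l : List Char) (q : Char) :
    PySem.Chars.splitOn l [q] = pvSplitCh q l := by
  rw [PySem.Chars.splitOn, pvSplitGo q l (l.length + 1) [] [] (by omega)]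
  obtain ⟨p, ps, hps⟩ : ∃ p ps, pvSplitCh q l = p :: ps := by
    cases hsp : pvSplitCh q l with
    | nil => exact absurd hsp (pvSplitCh_ne_nil q l)
    | cons p ps => exact ⟨p, ps, rfl⟩
  simp [hps, pvMapHead]

theorem pvSplitCh_join (q : Char) : ∀ (l : List Char) (p : List Char) (ps : List (List Char)),
    pvSplitCh q l = p :: ps → p ++ pvTailJoin q ps = l := by
  intro l
  induction l with
  | nil =>
    intro p ps h; simp [pvSplitCh] at h
    rw [h.1, h.2]; simp [pvTailJoin]
  | cons c t ih =>
    intro p ps h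
    obtain ⟨p', ps', hps⟩ : ∃ p' ps', pvSplitCh q t = p' :: ps' := by
      cases hsp : pvSplitCh q t with
      | nil => exact absurd hsp (pvSplitCh_ne_nil q t)
      | cons a b => exact ⟨a, b, rfl⟩
    by_cases hq : c = q
    · subst hq
      simp only [pvSplitCh, if_true] at h
      rw [List.cons.injEq] at h
      rw [← h.1, ← h.2, hps]
      simp [pvTailJoin, ih p' ps' hps]
    · simp only [pvSplitCh, if_neg hq, hps] at h
      rw [List.cons.injEq] at h
      rw [← h.1, ← h.2]
      simp [ih p' ps' hps]

theorem pvSplitCh_not_mem (q : Char) : ∀ (l : List Char), ∀ p ∈ pvSplitCh q l, q ∉ p := by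
  intro l
  induction l with
  | nil => intro p hp; simp [pvSplitCh] at hp; simp [hp]
  | cons c t ih =>
    intro p hp
    obtain ⟨p', ps', hps⟩ : ∃ p' ps', pvSplitCh q t = p' :: ps' := by
      cases hsp : pvSplitCh q t with
      | nil => exact absurd hsp (pvSplitCh_ne_nil q t)
      | cons a b => exact ⟨a, b, rfl⟩
    by_cases hq : c = q
    · subst hq
      simp only [pvSplitCh] at hp
      rcases List.mem_cons.1 hp with h | h
      · simp [h]
      · exact ih p h
    · simp only [pvSplitCh, if_neg hq, hps] at hp
      rcases List.mem_cons.1 hp with h | h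
      · subst h
        intro hmem
        rcases List.mem_cons.1 hmem with h | h
        · exact hq h.symm
        · exact ih p' (hps ▸ List.mem_cons_self ..) h
      · exact ih p (hps ▸ List.mem_cons_of_mem _ h)

-- foldl of A's step over a comma-free chunk
theorem pvChunk : ∀ (p : List Char) (res : List String) (cur : List Char) (q : Bool), ',' ∉ p →
    List.foldl pvStepA (res, cur, q) p
      = (res, cur ++ pvRemQ p, xor q (decide (pvCntQ p % 2 = 1))) := by
  intro p
  induction p with
  | nil => intro res cur q h; simp [pvRemQ, pvCntQ]
  | cons c t ih =>
    intro res cur q h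
    have hc : c ≠ ',' := fun hc => h (hc ▸ List.mem_cons_self ..)
    have ht : ',' ∉ t := fun hm => h (List.mem_cons_of_mem _ hm)
    rw [List.foldl_cons]
    by_cases hq : c = '\'' ∨ c = '"'
    · have hstep : pvStepA (res, cur, q) c = (res, cur, !q) := by
        simp [pvStepA, hq]
      rw [hstep, ih res cur (!q) ht]
      have hrem : pvRemQ (c :: t) = pvRemQ t := by
        rcases hq with h1 | h1 <;> subst h1 <;> simp [pvRemQ]
      have hcnt : pvCntQ (c :: t) % 2 = (pvCntQ t + 1) % 2 := by
        rcases hq with h1 | h1 <;> subst h1 <;>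
          simp [pvCntQ] <;> omega
      have hpar : decide (pvCntQ (c :: t) % 2 = 1) = !decide (pvCntQ t % 2 = 1) := by
        rw [hcnt]
        by_cases hk : pvCntQ t % 2 = 1 <;> simp [hk] <;> omega
      rw [hrem, hpar]
      cases q <;> simp
    · have hq1 : ¬(c = '\'' ∨ c = '"') := hq
      have hstep : pvStepA (res, cur, q) c = (res, cur ++ [c], q) := by
        simp only [pvStepA, if_neg hq1]
        rw [if_neg (by simp [hc])]
      rw [hstep, ih res (cur ++ [c]) q ht]
      have hrem : pvRemQ (c :: t) = c :: pvRemQ t := by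
        simp only [pvRemQ, List.filter_cons]
        rw [if_pos (by simp; tauto)]
      have hcnt : pvCntQ (c :: t) = pvCntQ t := by
        simp only [pvCntQ, List.count_cons]
        have h1 : (c == '\'') = false := by simp; tauto
        have h2 : (c == '"') = false := by simp; tauto
        rw [h1, h2]; simp
      rw [hrem, hcnt]
      simp

theorem pvDropWhileNoop {p : Char → Bool} : ∀ {l : List Char}, (∀ c ∈ l, p c = false) → List.dropWhile p l = l := by
  intro l h
  cases l with
  | nil => rfl
  | cons c t => simp [h c (List.mem_cons_self ..)]

theorem pvMemStrip {c : Char} {l : List Char} (h : c ∈ PySem.Chars.strip l) : c ∈ l := by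
  simp only [PySem.Chars.strip, PySem.Chars.rstrip, PySem.Chars.lstrip, List.mem_reverse] at h
  exact (List.dropWhile_sublist _).mem (List.mem_reverse.1 ((List.dropWhile_sublist _).mem h))

theorem pvStripCharsNoop {l : List Char} (h : ∀ c ∈ l, ¬(c = '\'' ∨ c = '"')) :
    PySem.Chars.stripChars l ['\'', '"'] = l := by
  have hp : ∀ c ∈ l, (['\'', '"'].contains c) = false := by
    intro c hc
    have := h c hc
    simp only [List.contains_eq_mem, decide_eq_false_iff_not, List.mem_cons]
    tauto
  simp only [PySem.Chars.stripChars]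
  rw [pvDropWhileNoop hp, pvDropWhileNoop (by intro c hc; exact hp c (List.mem_reverse.1 hc)),
    List.reverse_reverse]

theorem pvRemQ_noQuote (b : List Char) : ∀ c ∈ pvRemQ b, ¬(c = '\'' ∨ c = '"') := by
  intro c hc
  simp only [pvRemQ, List.mem_filter, Bool.not_eq_true', Bool.or_eq_false_iff, beq_eq_false_iff_ne] at hc
  tauto

theorem pvEmitB_eq (res : List String) (b : List Char) : pvEmitB res b = pvEmitA res (pvRemQ b) := by
  simp only [pvEmitB, pvEmitA, pvRemQ_eq]
  rw [pvStripCharsNoop (fun c hc => pvRemQ_noQuote b c (pvMemStrip hc))]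

theorem pvStepFirst (p : List Char) (resA : List String) (h : ',' ∉ p) :
    pvInv (List.foldl pvStepA (resA, [], false) p) (pvStepB (resA, none) p) := by
  rw [pvChunk p resA [] false h]
  have hcnt : List.count '\'' p + List.count '"' p = pvCntQ p := rfl
  simp only [pvStepB, pvCount_single, hcnt, List.nil_append, Bool.false_xor]
  by_cases he : pvCntQ p % 2 = 1
  · rw [if_neg (by omega)]
    exact ⟨pvRemQ_noQuote p, by simp [he], rfl, he, rfl⟩
  · rw [if_pos (by omega)]
    rw [pvEmitB_eq]
    exact ⟨pvRemQ_noQuote p, by simp [he], rfl⟩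

theorem pvStepC (p : List Char) (stA : List String × List Char × Bool)
    (stB : List String × Option (List Char)) (h : ',' ∉ p) (hinv : pvInv stA stB) :
    pvInv (List.foldl pvStepA (pvStepA stA ',') p) (pvStepB stB p) := by
  obtain ⟨resA, cur, q⟩ := stA
  obtain ⟨resB, buf⟩ := stB
  cases buf with
  | none =>
    obtain ⟨hfree, hq, hres⟩ := hinv
    simp only at hq hres
    subst hq
    have hstep : pvStepA (resA, cur, false) ',' = (resB, [], false) := by
      simp only [pvStepA]
      rw [if_neg (by simp), if_pos (by simp)]
      rw [hres]; rfl
    rw [hstep]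
    exact pvStepFirst p resB h
  | some b =>
    obtain ⟨hfree, hq, hcur, hodd, hres⟩ := hinv
    simp only at hq hcur hodd hres
    subst hq hres
    have hstep : pvStepA (resB, cur, true) ',' = (resB, cur ++ [','], true) := by
      simp only [pvStepA]
      rw [if_neg (by simp), if_neg (by simp)]
    rw [hstep, pvChunk p resB (cur ++ [',']) true h]
    have hrem : pvRemQ (b ++ ',' :: p) = pvRemQ b ++ ',' :: pvRemQ p := by
      simp [pvRemQ, List.filter_append]
    have hcnt2 : pvCntQ (b ++ ',' :: p) = pvCntQ b + pvCntQ p := by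
      simp [pvCntQ, List.count_append]
      omega
    have hcnt : List.count '\'' (b ++ ',' :: p) + List.count '"' (b ++ ',' :: p)
        = pvCntQ b + pvCntQ p := by rw [← hcnt2]; rfl
    simp only [pvStepB, pvCount_single, hcnt]
    by_cases hp : pvCntQ p % 2 = 1
    · rw [if_pos (by omega)]
      rw [pvEmitB_eq]
      refine ⟨?_, ?_, ?_⟩
      · intro c hc
        apply pvRemQ_noQuote (b ++ ',' :: p)
        rw [hrem]
        simpa [hcur] using hc
      · simp [hp]
      · simp only [hrem, hcur]
        simp
    · rw [if_neg (by omega)]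
      refine ⟨?_, by simp [hp], ?_, by omega, rfl⟩
      · intro c hc
        apply pvRemQ_noQuote (b ++ ',' :: p)
        rw [hrem]
        simpa [hcur] using hc
      · simp [hrem, hcur]

theorem pvFinish (stA : List String × List Char × Bool) (stB : List String × Option (List Char))
    (hinv : pvInv stA stB) : pvFinishA stA = pvFinishB stB := by
  obtain ⟨resA, cur, q⟩ := stA
  obtain ⟨resB, buf⟩ := stB
  cases buf with
  | none =>
    obtain ⟨-, -, hres⟩ := hinv
    simp only at hres
    simp [pvFinishA, pvFinishB, hres]
  | some b =>
    obtain ⟨-, -, hcur, -, hres⟩ := hinv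
    simp only at hcur hres
    simp only [pvFinishA, pvFinishB, pvEmitB_eq, hcur, hres]

theorem pvMainC : ∀ (parts : List (List Char)) (stA : List String × List Char × Bool)
    (stB : List String × Option (List Char)), (∀ p ∈ parts, ',' ∉ p) → pvInv stA stB →
    pvFinishA (List.foldl pvStepA stA (pvTailJoin ',' parts))
      = pvFinishB (List.foldl pvStepB stB parts) := by
  intro parts
  induction parts with
  | nil => intro stA stB _ hinv; exact pvFinish stA stB hinv
  | cons p ps ih =>
    intro stA stB hmem hinv
    simp only [pvTailJoin, List.foldl_cons, List.foldl_append]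
    exact ih _ _ (fun r hr => hmem r (List.mem_cons_of_mem _ hr))
      (pvStepC p stA stB (hmem p (List.mem_cons_self ..)) hinv)

-- ===== VERDICT (by name: the statement is the Claim_ definition above) =====
theorem str_of_list_to_list_spec : Claim_equal_str_of_list_to_list := by
  intro s _
  unfold Spec_str_of_list_to_list str_of_list_to_list str_of_list_to_list_alt
  simp only [pvSplitOn_single]
  obtain ⟨p, ps, hps⟩ : ∃ p ps, pvSplitCh ',' (PySem.Chars.stripChars s.toList ['[', ']']) = p :: ps := by
    cases hsp : pvSplitCh ',' (PySem.Chars.stripChars s.toList ['[', ']']) with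
    | nil => exact absurd hsp (pvSplitCh_ne_nil ',' _)
    | cons a b => exact ⟨a, b, rfl⟩
  have hjoin := pvSplitCh_join ',' _ p ps hps
  have hp : ',' ∉ p := pvSplitCh_not_mem ',' _ p (hps ▸ List.mem_cons_self ..)
  have hmem : ∀ r ∈ ps, ',' ∉ r := fun r hr =>
    pvSplitCh_not_mem ',' _ r (hps ▸ List.mem_cons_of_mem _ hr)
  rw [hps, ← hjoin]
  show pvFinishA _ = pvFinishB _
  rw [List.foldl_append, List.foldl_cons]
  exact pvMainC ps _ _ hmem (pvStepFirst p [] hp)
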